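-- pv_equiv track=rewrite | github.com/kochj23/nova | scripts/dream_generate.py | _extract_interesting_sections
-- ===== SOURCE A (Python) =====
-- def _extract_interesting_sections(content: str) -> str:
--     """
--     Parse a daily memory file and return the interesting parts for dreaming,
--     deprioritizing cron job counts (operational noise) and promoting sections
--     with actual human or world content.
--     """
--     if not content.strip():
--         return ""
--
--     # Split into sections by ## headers
--     sections = {}
--     current_header = ""
--     current_lines = []
--     for line in content.splitlines():
--         if line.startswith("## "):
--             if current_header:
--                 sections[current_header] = "\n".join(current_lines)
--             current_header = line.strip()
--             current_lines = []
--         elif not line.startswith("# ") and "Written at" not in line: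
--             current_lines.append(line)
--     if current_header:
--         sections[current_header] = "\n".join(current_lines)
--
--     # Priority order: interesting world/life content first, operational noise last
--     priority_order = [
--         "## What Reddit is talking about",   # multi-subreddit — rich dream material
--         "## What Burbank is talking about",  # subreddit — most dreamlike
--         "## Meetings today",                 # Jordan's actual day
--         "## What happened on GitHub today",  # what Jordan built
--         "## Emails that need attention",     # communication
--         "## Weather in Burbank",             # sensory/atmospheric
--         "## Moon phase and sky tonight",     # dreamlike
--         "## Home status",                    # place and setting
--         "## Memory Synthesis",               # 4am consolidation — rich patterns
--         "## Packages in transit",            # only if something is actually tracked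
--         "## Nova's activity today",          # cron noise — last priority
--     ]
--
--     parts = []
--     for header in priority_order:
--         text = sections.get(header, "").strip()
--         if not text:
--             continue
--         # Skip sections that are just "no activity" / "no items" type messages
--         if any(skip in text.lower() for skip in [
--             "no activity", "no action items", "no package notifications",
--             "no posts found", "no meetings"
--         ]):
--             continue
--         # For cron activity, only include a brief summary (not the full job list)
--         if "activity today" in header.lower():
--             cron_lines = text.splitlines()
--             # Keep just the summary lines (total count, Slack messages, apps running)
--             brief = [l for l in cron_lines if any(kw in l.lower() for kw in
--                      ["slack messages", "apps running", "memory written"])]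
--             if brief:
--                 parts.append(header + "\n" + "\n".join(brief))
--             continue
--         parts.append(header + "\n" + text)
--
--     return "\n\n".join(parts)
-- ===== SOURCE B (Python) =====
-- _PRIORITY = [
--     "## What Reddit is talking about",
--     "## What Burbank is talking about",
--     "## Meetings today",
--     "## What happened on GitHub today",
--     "## Emails that need attention",
--     "## Weather in Burbank",
--     "## Moon phase and sky tonight",
--     "## Home status",
--     "## Memory Synthesis",
--     "## Packages in transit",
--     "## Nova's activity today",
-- ]
--
-- _SKIP = ["no activity", "no action items", "no package notifications",
--          "no posts found", "no meetings"]
--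
-- _BRIEF = ["slack messages", "apps running", "memory written"]
--
--
-- def _keep(line):
--     return not line.startswith("# ") and "Written at" not in line
--
--
-- def _format_section(header, raw):
--     """The formatted block for one section, or None if it is noise."""
--     text = raw.strip()
--     if not text:
--         return None
--     low = text.lower()
--     if any(p in low for p in _SKIP):
--         return None
--     if "activity today" in header.lower():
--         brief = [l for l in text.splitlines()
--                  if any(kw in l.lower() for kw in _BRIEF)]
--         return header + "\n" + "\n".join(brief) if brief else None
--     return header + "\n" + text
--
--
-- def _sections(lines):
--     """Chunk the line list by index arithmetic: for each '## ' header line scan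
--     ahead to the next header, slice the body out, filter it and store it; a
--     later duplicate header overwrites the earlier body."""
--     sections = {}
--     n = len(lines)
--     k = 0
--     while k < n:
--         if lines[k].startswith("## "):
--             j = k + 1
--             while j < n and not lines[j].startswith("## "):
--                 j += 1
--             body = [l for l in lines[k + 1:j] if _keep(l)]
--             sections[lines[k].strip()] = "\n".join(body)
--             k = j
--         else:
--             k += 1
--     return sections
--
--
-- def _extract_interesting_sections(content: str) -> str:
--     if not content.strip():
--         return ""
--     sections = _sections(content.splitlines())
--     rank = {h: r for r, h in enumerate(_PRIORITY)}
--     ranked = []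
--     for header, raw in sections.items():
--         r = rank.get(header)
--         if r is None:
--             continue
--         block = _format_section(header, raw)
--         if block is not None:
--             ranked.append((r, block))
--     ranked.sort(key=lambda t: t[0])
--     return "\n\n".join(block for _, block in ranked)
-- ===== Notes on version B (the rewrite author's own statement) =====
-- stated objective: alternative
-- what changed: B parses by index arithmetic (for each '## ' header scan ahead to the next header and slice the body out, instead of A's single accumulator fold carrying a pending header), and replaces A's fixed priority-list driver by a rank map: it iterates the parsed sections, keeps those present in the rank map, collects (rank, block) pairs and sorts them by rank before joining.
import Mathlib
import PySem

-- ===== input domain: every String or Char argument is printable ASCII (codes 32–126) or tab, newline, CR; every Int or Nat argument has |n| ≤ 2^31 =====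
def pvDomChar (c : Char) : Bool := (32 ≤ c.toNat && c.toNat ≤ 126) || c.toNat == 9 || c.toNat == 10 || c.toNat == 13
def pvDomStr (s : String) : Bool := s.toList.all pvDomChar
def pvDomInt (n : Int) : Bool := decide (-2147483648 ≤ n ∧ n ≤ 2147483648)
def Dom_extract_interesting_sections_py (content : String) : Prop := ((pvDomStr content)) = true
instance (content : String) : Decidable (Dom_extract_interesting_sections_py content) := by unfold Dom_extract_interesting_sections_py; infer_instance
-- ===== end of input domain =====

-- B parses by index arithmetic (scan ahead from each '## ' header to the next and
-- slice the body out) and orders the output by a rank map + sort instead of A's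
-- fixed priority scan (objective: alternative decomposition, same O(n) cost).

-- shared literal constants of the module
def pvPriority : List String := [
  "## What Reddit is talking about",
  "## What Burbank is talking about",
  "## Meetings today",
  "## What happened on GitHub today",
  "## Emails that need attention",
  "## Weather in Burbank",
  "## Moon phase and sky tonight",
  "## Home status",
  "## Memory Synthesis",
  "## Packages in transit",
  "## Nova's activity today"]

def pvSkip : List String := ["no activity", "no action items", "no package notifications",
  "no posts found", "no meetings"]

def pvBrief : List String := ["slack messages", "apps running", "memory written"]

-- ===== PORT A =====
-- the parse-loop body of A (state: sections dict, current_header, current_lines)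
def pvStepA (acc : PySem.Dict String String × String × List String) (line : String) :
    PySem.Dict String String × String × List String :=
  let (sections, curH, curL) := acc
  if PySem.Str.startswith line "## " then
    let sections := if curH ≠ "" then sections.insert curH (PySem.Str.join "\n" curL) else sections
    (sections, PySem.Str.strip line, [])
  else if ¬ (PySem.Str.startswith line "# ") ∧ PySem.Str.isIn "Written at" line = false then
    (sections, curH, curL ++ [line])
  else acc

-- the output loop of A over the priority list
def pvPartsA (sections : PySem.Dict String String) : List String :=
  pvPriority.foldl (fun parts header =>
    let text := PySem.Str.strip (sections.getD header "")
    if text = "" then parts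
    else if pvSkip.any (fun skip => PySem.Str.isIn skip (PySem.Str.lower text)) then parts
    else if PySem.Str.isIn "activity today" (PySem.Str.lower header) then
      let brief := (PySem.Str.splitlines text).filter
        (fun l => pvBrief.any (fun kw => PySem.Str.isIn kw (PySem.Str.lower l)))
      if brief ≠ [] then parts ++ [header ++ "\n" ++ PySem.Str.join "\n" brief] else parts
    else parts ++ [header ++ "\n" ++ text]) []

def extract_interesting_sections_py (content : String) : String :=
  if PySem.Str.strip content = "" then "" else
  let st := (PySem.Str.splitlines content).foldl pvStepA (PySem.Dict.empty, "", [])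
  let sections := if st.2.1 ≠ "" then st.1.insert st.2.1 (PySem.Str.join "\n" st.2.2) else st.1
  PySem.Str.join "\n\n" (pvPartsA sections)

-- ===== PORT B =====
-- B's _keep helper
def pvKeep (line : String) : Bool :=
  !PySem.Str.startswith line "# " && !PySem.Str.isIn "Written at" line

-- B's _format_section: the block for one section, or none if it is noise
def pvFmt (header raw : String) : Option String :=
  let text := PySem.Str.strip raw
  if text = "" then none
  else if pvSkip.any (fun p => PySem.Str.isIn p (PySem.Str.lower text)) then none
  else if PySem.Str.isIn "activity today" (PySem.Str.lower header) then
    let brief := (PySem.Str.splitlines text).filter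
      (fun l => pvBrief.any (fun kw => PySem.Str.isIn kw (PySem.Str.lower l)))
    if brief ≠ [] then some (header ++ "\n" ++ PySem.Str.join "\n" brief) else none
  else some (header ++ "\n" ++ text)

-- the inner 'while j < n and not lines[j].startswith("## "): j += 1' of B's _sections
-- (lines.getD j "" is exact for j < n = len(lines), the only indices the loop reads)
def pvScanEnd (lines : List String) (n j : Nat) : Nat :=
  if h : j < n ∧ ¬ PySem.Str.startswith (lines.getD j "") "## " then
    pvScanEnd lines n (j + 1)
  else j
termination_by n - j
decreasing_by omega

-- cited by pvSecGo's decreasing_by: the scan never moves backwards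
theorem le_pvScanEnd (lines : List String) (n : Nat) : ∀ j, j ≤ pvScanEnd lines n j := by
  intro j
  have H : ∀ m j, n - j ≤ m → j ≤ pvScanEnd lines n j := by
    intro m
    induction m with
    | zero =>
      intro j hm
      rw [pvScanEnd]
      split
      · omega
      · exact Nat.le_refl j
    | succ m ih =>
      intro j hm
      rw [pvScanEnd]
      split
      · exact Nat.le_trans (Nat.le_succ j) (ih (j + 1) (by omega))
      · exact Nat.le_refl j
  exact H (n - j) j (Nat.le_refl _)

-- the outer index walk of B's _sections (lines[k+1:j] is PySem.List.slice)
def pvSecGo (lines : List String) (n : Nat) (sections : PySem.Dict String String) (k : Nat) :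
    PySem.Dict String String :=
  if hk : k < n then
    if PySem.Str.startswith (lines.getD k "") "## " then
      pvSecGo lines n
        (sections.insert (PySem.Str.strip (lines.getD k ""))
          (PySem.Str.join "\n"
            ((PySem.List.slice lines (some (((k + 1 : Nat) : Int)))
                (some ((pvScanEnd lines n (k + 1) : Nat) : Int))).filter pvKeep)))
        (pvScanEnd lines n (k + 1))
    else pvSecGo lines n sections (k + 1)
  else sections
termination_by n - k
decreasing_by
  · have := le_pvScanEnd lines n (k + 1); omega
  · omega

-- rank = {h: r for r, h in enumerate(_PRIORITY)}
def pvRank : PySem.Dict String Int :=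
  (PySem.List.enumerate pvPriority 0).foldl (fun d p => d.insert p.2 p.1) PySem.Dict.empty

def extract_interesting_sections_py_alt (content : String) : String :=
  if PySem.Str.strip content = "" then "" else
  let lines := PySem.Str.splitlines content
  let sections := pvSecGo lines lines.length PySem.Dict.empty 0
  let ranked := sections.items.foldl (fun ranked p =>
    match pvRank.get? p.1 with
    | none => ranked
    | some r =>
      match pvFmt p.1 p.2 with
      | none => ranked
      | some b => ranked ++ [(r, b)]) ([] : List (Int × String))
  PySem.Str.join "\n\n" ((PySem.List.sorted ranked (fun t => t.1)).map (fun t => t.2))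

-- ===== PRECONDITION & SPEC =====
def Spec_extract_interesting_sections_py (content : String) (out : String) : Prop := out = extract_interesting_sections_py_alt content
instance (content : String) (out : String) : Decidable (Spec_extract_interesting_sections_py content out) := by unfold Spec_extract_interesting_sections_py; infer_instance

-- ===== CLAIM (what is proved, stated in full; the proofs are below) =====
def Claim_equal_extract_interesting_sections_py : Prop := ∀ (content : String), Dom_extract_interesting_sections_py content → Spec_extract_interesting_sections_py content (extract_interesting_sections_py content)

-- ===== LEMMAS AND PROOFS =====

-- abbreviation for the takeWhile/dropWhile predicate 'not a header line'
def pvNH (l : String) : Bool := !PySem.Str.startswith l "## "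

-- A's final commit of the pending section
def pvFinalA (st : PySem.Dict String String × String × List String) : PySem.Dict String String :=
  if st.2.1 ≠ "" then st.1.insert st.2.1 (PySem.Str.join "\n" st.2.2) else st.1

-- structural mirror of B's index walk: chunk the list at header lines
def pvSecL (d : PySem.Dict String String) : List String → PySem.Dict String String
  | [] => d
  | l :: rest =>
    if PySem.Str.startswith l "## " then
      pvSecL (d.insert (PySem.Str.strip l)
        (PySem.Str.join "\n" ((rest.takeWhile pvNH).filter pvKeep))) (rest.dropWhile pvNH)
    else pvSecL d rest
termination_by ls => ls.length
decreasing_by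
  · exact Nat.lt_succ_of_le (List.length_dropWhile_le _ _)
  · exact Nat.lt_succ_self _

lemma pvPriority_nodup : pvPriority.Nodup := by decide

lemma pvScanEnd_spec (lines : List String) (j : Nat) (hj : j ≤ lines.length) :
    pvScanEnd lines lines.length j = j + ((lines.drop j).takeWhile pvNH).length := by
  have H : ∀ m j, lines.length - j ≤ m → j ≤ lines.length →
      pvScanEnd lines lines.length j = j + ((lines.drop j).takeWhile pvNH).length := by
    intro m
    induction m with
    | zero =>
      intro j hm hj
      have hje : j = lines.length := by omega
      subst hje
      rw [pvScanEnd, dif_neg (by omega)]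
      simp [List.drop_length]
    | succ m ih =>
      intro j hm hj
      rcases Nat.lt_or_ge j lines.length with hlt | hge
      · have hdrop : lines.drop j = lines[j] :: lines.drop (j + 1) :=
          List.drop_eq_getElem_cons hlt
        have hget : lines.getD j "" = lines[j] := List.getD_eq_getElem lines "" hlt
        rw [pvScanEnd]
        by_cases hh : PySem.Str.startswith (lines.getD j "") "## " = true
        · have hh' : PySem.Str.startswith lines[j] "## " = true := by rw [← hget]; exact hh
          rw [dif_neg (fun hc => hc.2 hh)]
          rw [hdrop, List.takeWhile_cons_of_neg
            (by simp only [pvNH, hh', Bool.not_true]; exact Bool.false_ne_true)]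
          simp
        · have hh' : PySem.Str.startswith lines[j] "## " = false := by
            rw [← hget]; exact Bool.eq_false_iff.mpr hh
          rw [dif_pos ⟨hlt, hh⟩, ih (j + 1) (by omega) (by omega),
            hdrop, List.takeWhile_cons_of_pos (by simp only [pvNH, hh', Bool.not_false])]
          simp
          omega
      · have hje : j = lines.length := by omega
        subst hje
        rw [pvScanEnd, dif_neg (by omega)]
        simp [List.drop_length]
  exact H (lines.length - j) j (Nat.le_refl _) hj

lemma pvSecGo_eq_secL (lines : List String) (d : PySem.Dict String String) (k : Nat)
    (hk : k ≤ lines.length) :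
    pvSecGo lines lines.length d k = pvSecL d (lines.drop k) := by
  have H : ∀ m k (d : PySem.Dict String String), lines.length - k ≤ m → k ≤ lines.length →
      pvSecGo lines lines.length d k = pvSecL d (lines.drop k) := by
    intro m
    induction m with
    | zero =>
      intro k d hm hk
      have hke : k = lines.length := by omega
      subst hke
      rw [pvSecGo, dif_neg (by omega)]
      simp [List.drop_length, pvSecL]
    | succ m ih =>
      intro k d hm hk
      rcases Nat.lt_or_ge k lines.length with hlt | hge
      · have hdrop : lines.drop k = lines[k] :: lines.drop (k + 1) :=
          List.drop_eq_getElem_cons hlt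
        have hget : lines.getD k "" = lines[k] := List.getD_eq_getElem lines "" hlt
        rw [pvSecGo, dif_pos hlt]
        by_cases hh : PySem.Str.startswith (lines.getD k "") "## " = true
        · have hh' : PySem.Str.startswith lines[k] "## " = true := by rw [← hget]; exact hh
          rw [if_pos hh]
          have hspec := pvScanEnd_spec lines (k + 1) (by omega)
          have htle : ((lines.drop (k + 1)).takeWhile pvNH).length ≤ lines.length - (k + 1) := by
            have h1 : ((lines.drop (k + 1)).takeWhile pvNH).length ≤ (lines.drop (k + 1)).length :=
              (List.takeWhile_sublist _).length_le
            simpa using h1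
          set tw := (lines.drop (k + 1)).takeWhile pvNH with htw
          set dw := (lines.drop (k + 1)).dropWhile pvNH with hdw
          have hsplit : tw ++ dw = lines.drop (k + 1) :=
            List.takeWhile_append_dropWhile
          have hslice : PySem.List.slice lines (some (((k + 1 : Nat) : Int)))
              (some ((pvScanEnd lines lines.length (k + 1) : Nat) : Int)) = tw := by
            rw [PySem.List.slice_natCast, hspec, Nat.add_sub_cancel_left, ← hsplit]
            exact List.take_left
          have hdropj : lines.drop (pvScanEnd lines lines.length (k + 1)) = dw := by
            rw [hspec, ← List.drop_drop, ← hsplit]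
            exact List.drop_left
          rw [hslice, hget,
            ih (pvScanEnd lines lines.length (k + 1)) _ (by omega) (by omega),
            hdropj, hdrop, pvSecL, if_pos hh']
        · have hh' : PySem.Str.startswith lines[k] "## " = false := by
            rw [← hget]; exact Bool.eq_false_iff.mpr hh
          rw [if_neg hh, ih (k + 1) d (by omega) (by omega), hdrop, pvSecL,
            if_neg (by rw [hh']; exact Bool.false_ne_true)]
      · have hke : k = lines.length := by omega
        subst hke
        rw [pvSecGo, dif_neg (by omega)]
        simp [List.drop_length, pvSecL]
  exact H (lines.length - k) k d (Nat.le_refl _) hk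

lemma pvStrip_hdr_ne (l : String) (h : PySem.Str.startswith l "## " = true) :
    PySem.Str.strip l ≠ "" := by
  intro hc
  have h2 : (PySem.Str.strip l).toList = [] := by rw [hc]; rfl
  rw [PySem.Str.toList_strip] at h2
  have hp : ("## ".toList) <+: l.toList := by
    rw [PySem.Str.startswith_eq] at h
    exact (PySem.Chars.startswith_iff _ _).mp h
  obtain ⟨t, ht⟩ := hp
  rw [← ht] at h2
  revert h2
  show PySem.Chars.strip ('#' :: ('#' :: (' ' :: t))) ≠ []
  simp only [PySem.Chars.strip, PySem.Chars.lstrip, PySem.Chars.rstrip]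
  simp only [List.dropWhile_cons, show PySem.Chars.isspace '#' = false from rfl]
  simp
  exact ⟨'#', by simp, by decide⟩

lemma pvKeep_iff (l : String) :
    (¬ (PySem.Str.startswith l "# ") ∧ PySem.Str.isIn "Written at" l = false) ↔
      pvKeep l = true := by
  cases h1 : PySem.Str.startswith l "# " <;>
    cases h2 : PySem.Str.isIn "Written at" l <;>
      simp only [pvKeep, h1, h2, Bool.not_true, Bool.not_false, Bool.and_false,
        Bool.and_true] <;> simp

lemma pvFoldA_ne (ls : List String) (d : PySem.Dict String String) (h : String)
    (acc : List String) (hh : h ≠ "") :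
    pvFinalA (ls.foldl pvStepA (d, h, acc)) =
      pvSecL (d.insert h (PySem.Str.join "\n" (acc ++ (ls.takeWhile pvNH).filter pvKeep)))
        (ls.dropWhile pvNH) := by
  induction ls generalizing d h acc hh with
  | nil => simp [pvFinalA, hh, pvSecL]
  | cons l rest ih =>
    by_cases hl : PySem.Str.startswith l "## " = true
    · have hnl : pvNH l = false := by simp only [pvNH, hl, Bool.not_true]
      have hstep : pvStepA (d, h, acc) l =
          (d.insert h (PySem.Str.join "\n" acc), PySem.Str.strip l, []) := by
        simp only [pvStepA]
        rw [if_pos hl, if_pos hh]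
      rw [List.foldl_cons, hstep,
        ih (d.insert h (PySem.Str.join "\n" acc)) (PySem.Str.strip l) [] (pvStrip_hdr_ne l hl),
        List.takeWhile_cons_of_neg (by rw [hnl]; exact Bool.false_ne_true),
        List.dropWhile_cons_of_neg (by rw [hnl]; exact Bool.false_ne_true),
        pvSecL, if_pos hl]
      simp
    · have hnl : pvNH l = true := by
        simp only [pvNH, Bool.eq_false_iff.mpr hl, Bool.not_false]
      by_cases hk : pvKeep l = true
      · have hstep : pvStepA (d, h, acc) l = (d, h, acc ++ [l]) := by
          simp only [pvStepA]
          rw [if_neg hl, if_pos (pvKeep_iff l |>.mpr hk)]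
        rw [List.foldl_cons, hstep, ih d h (acc ++ [l]) hh,
          List.takeWhile_cons_of_pos hnl, List.dropWhile_cons_of_pos hnl,
          List.filter_cons_of_pos hk]
        simp
      · have hstep : pvStepA (d, h, acc) l = (d, h, acc) := by
          simp only [pvStepA]
          rw [if_neg hl, if_neg (fun hc => hk ((pvKeep_iff l).mp hc))]
        rw [List.foldl_cons, hstep, ih d h acc hh,
          List.takeWhile_cons_of_pos hnl, List.dropWhile_cons_of_pos hnl,
          List.filter_cons_of_neg (by rw [Bool.eq_false_iff.mpr hk]; exact Bool.false_ne_true)]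

lemma pvFoldA_empty (ls : List String) (d : PySem.Dict String String) (acc : List String) :
    pvFinalA (ls.foldl pvStepA (d, "", acc)) = pvSecL d ls := by
  induction ls generalizing d acc with
  | nil => simp [pvFinalA, pvSecL]
  | cons l rest ih =>
    by_cases hl : PySem.Str.startswith l "## " = true
    · have hstep : pvStepA (d, "", acc) l = (d, PySem.Str.strip l, []) := by
        simp only [pvStepA]
        rw [if_pos hl, if_neg (by simp)]
      rw [List.foldl_cons, hstep,
        pvFoldA_ne rest d (PySem.Str.strip l) [] (pvStrip_hdr_ne l hl),
        pvSecL, if_pos hl]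
      simp
    · by_cases hk : pvKeep l = true
      · have hstep : pvStepA (d, "", acc) l = (d, "", acc ++ [l]) := by
          simp only [pvStepA]
          rw [if_neg hl, if_pos (pvKeep_iff l |>.mpr hk)]
        rw [List.foldl_cons, hstep, ih d (acc ++ [l]), pvSecL,
          if_neg (fun hc => hl hc)]
      · have hstep : pvStepA (d, "", acc) l = (d, "", acc) := by
          simp only [pvStepA]
          rw [if_neg hl, if_neg (fun hc => hk ((pvKeep_iff l).mp hc))]
        rw [List.foldl_cons, hstep, ih d acc, pvSecL, if_neg (fun hc => hl hc)]

lemma pvSecL_nodup (d : PySem.Dict String String) (ls : List String) (hd : d.keys.Nodup) :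
    (pvSecL d ls).keys.Nodup := by
  have H : ∀ n (ls : List String) (d : PySem.Dict String String), ls.length ≤ n →
      d.keys.Nodup → (pvSecL d ls).keys.Nodup := by
    intro n
    induction n with
    | zero =>
      intro ls d hn hd
      have : ls = [] := List.length_eq_zero_iff.mp (by omega)
      subst this
      simpa [pvSecL] using hd
    | succ n ih =>
      intro ls d hn hd
      cases ls with
      | nil => simpa [pvSecL] using hd
      | cons l rest =>
        rw [pvSecL]
        split
        · exact ih _ _ (by
            have := (List.dropWhile_sublist (l := rest) (p := pvNH)).length_le
            simp at hn; omega) (PySem.Dict.nodup_keys_insert _ _ _ hd)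
        · exact ih _ _ (by simp at hn; omega) hd
  exact H ls.length ls d (Nat.le_refl _) hd

-- generic: the rank-building fold looked up
lemma pvEnumFold_get? (P : List String) (hnd : P.Nodup) :
    ∀ (s : Int) (d : PySem.Dict String Int) (h : String),
    ((PySem.List.enumerate P s).foldl (fun d p => d.insert p.2 p.1) d).get? h =
      (match PySem.List.index? P h with
       | some k => some (s + (k : Int))
       | none => d.get? h) := by
  revert hnd
  induction P with
  | nil =>
    intro _ s d h
    simp [PySem.List.enumerate, PySem.List.index?_eq_idxOf?]
  | cons x xs ih =>
    intro hnd s d h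
    obtain ⟨hx1, hx2⟩ := List.nodup_cons.mp hnd
    rw [PySem.List.enumerate_cons, List.foldl_cons, ih hx2 (s + 1) (d.insert x s) h]
    by_cases hx : h = x
    · subst hx
      rw [PySem.List.index?_cons_self,
        show PySem.List.index? xs h = none from (PySem.List.index?_eq_none_iff _ _).mpr hx1]
      simp [PySem.Dict.get?_insert_self]
    · rw [PySem.List.index?_cons_of_ne xs (fun he => hx he.symm)]
      cases hi : PySem.List.index? xs h with
      | none => simp [PySem.Dict.get?_insert_of_ne _ _ hx]
      | some k =>
        simp only [Option.map_some]
        push_cast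
        ring_nf

lemma pvRank_get? (h : String) :
    pvRank.get? h = (PySem.List.index? pvPriority h).map (fun k => (k : Int)) := by
  unfold pvRank
  rw [pvEnumFold_get? pvPriority pvPriority_nodup 0 PySem.Dict.empty h]
  cases hi : PySem.List.index? pvPriority h with
  | none => simp [PySem.Dict.get?_empty]
  | some k => simp

lemma pvIndex?_iff (h : String) (k : Nat) :
    PySem.List.index? pvPriority h = some k ↔
      ∃ hk : k < pvPriority.length, pvPriority[k] = h := by
  constructor
  · intro hi
    obtain ⟨hk, he, -⟩ := PySem.List.getElem_of_index?_eq_some hi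
    exact ⟨hk, he⟩
  · rintro ⟨hk, he⟩
    have hmem : h ∈ pvPriority := he ▸ List.getElem_mem hk
    obtain ⟨k', hk'⟩ := Option.isSome_iff_exists.mp ((PySem.List.index?_isSome_iff _ _).mpr hmem)
    obtain ⟨hk'b, he', -⟩ := PySem.List.getElem_of_index?_eq_some hk'
    have : k' = k := by
      have := (List.Nodup.getElem_inj_iff pvPriority_nodup (hi := hk'b) (hj := hk)).mp
        (by rw [he', he])
      exact this
    rw [hk', this]

lemma pvRank_some_iff (h : String) (r : Int) :
    pvRank.get? h = some r ↔
      ∃ (k : Nat) (hk : k < pvPriority.length), pvPriority[k] = h ∧ r = (k : Int) := by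
  rw [pvRank_get?]
  constructor
  · intro he
    cases hi : PySem.List.index? pvPriority h with
    | none => rw [hi] at he; exact absurd he (by simp)
    | some k =>
      rw [hi] at he
      have he' : ((k : Nat) : Int) = r := by simpa using he
      obtain ⟨hk, hke⟩ := (pvIndex?_iff h k).mp hi
      exact ⟨k, hk, hke, he'.symm⟩
  · rintro ⟨k, hk, he, hr⟩
    rw [(pvIndex?_iff h k).mpr ⟨hk, he⟩, hr]
    rfl

lemma pvFmt_empty (h : String) : pvFmt h "" = none := by
  unfold pvFmt
  rw [show PySem.Str.strip "" = "" from by decide]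
  simp

lemma pvFoldl_toList {α β : Type} (f : α → Option β) (l : List α) (init : List β) :
    l.foldl (fun acc x => acc ++ (f x).toList) init = init ++ l.filterMap f := by
  induction l generalizing init with
  | nil => simp
  | cons x t ih => cases hf : f x <;> simp [ih, hf]

-- A's output loop over one priority header, rewritten through pvFmt
lemma pvStepA_out (parts : List String) (header : String) (d : PySem.Dict String String) :
    (let text := PySem.Str.strip (d.getD header "")
     if text = "" then parts
     else if pvSkip.any (fun skip => PySem.Str.isIn skip (PySem.Str.lower text)) then parts
     else if PySem.Str.isIn "activity today" (PySem.Str.lower header) then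
       let brief := (PySem.Str.splitlines text).filter
         (fun l => pvBrief.any (fun kw => PySem.Str.isIn kw (PySem.Str.lower l)))
       if brief ≠ [] then parts ++ [header ++ "\n" ++ PySem.Str.join "\n" brief] else parts
     else parts ++ [header ++ "\n" ++ text]) =
    parts ++ (pvFmt header (d.getD header "")).toList := by
  unfold pvFmt
  simp only []
  split_ifs <;> simp

-- both outputs, given one dict with nodup keys
lemma pvOut_eq (D : PySem.Dict String String) (hnd : D.keys.Nodup) :
    (PySem.List.sorted
      (D.items.foldl (fun ranked p =>
        match pvRank.get? p.1 with
        | none => ranked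
        | some r =>
          match pvFmt p.1 p.2 with
          | none => ranked
          | some b => ranked ++ [(r, b)]) ([] : List (Int × String)))
      (fun t => t.1)).map (fun t => t.2) = pvPartsA D := by
  have hpair_items : D.items.Pairwise (fun p q => p.1 ≠ q.1) := by
    have h1 := hnd
    simp only [PySem.Dict.keys] at h1
    exact List.pairwise_map.mp h1
  have hGsome : ∀ (p : String × String) (r : Int) (b : String),
      ((pvRank.get? p.1).bind (fun r => (pvFmt p.1 p.2).map (fun b => (r, b)))) = some (r, b) ↔
        pvRank.get? p.1 = some r ∧ pvFmt p.1 p.2 = some b := by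
    intro p r b
    cases h1 : pvRank.get? p.1 <;> cases h2 : pvFmt p.1 p.2 <;> simp [h1, h2]
  have hB : D.items.foldl (fun ranked p =>
      match pvRank.get? p.1 with
      | none => ranked
      | some r =>
        match pvFmt p.1 p.2 with
        | none => ranked
        | some b => ranked ++ [(r, b)]) ([] : List (Int × String)) =
      D.items.filterMap (fun p =>
        (pvRank.get? p.1).bind (fun r => (pvFmt p.1 p.2).map (fun b => (r, b)))) := by
    rw [show (fun (ranked : List (Int × String)) (p : String × String) =>
        match pvRank.get? p.1 with
        | none => ranked
        | some r =>
          match pvFmt p.1 p.2 with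
          | none => ranked
          | some b => ranked ++ [(r, b)]) =
        (fun acc p => acc ++
          ((pvRank.get? p.1).bind (fun r => (pvFmt p.1 p.2).map (fun b => (r, b)))).toList) from
      funext fun acc => funext fun p => by
        cases h1 : pvRank.get? p.1 <;> cases h2 : pvFmt p.1 p.2 <;> simp [h1, h2]]
    rw [pvFoldl_toList]
    exact List.nil_append _
  have hA : pvPartsA D = pvPriority.filterMap (fun h => pvFmt h (D.getD h "")) := by
    unfold pvPartsA
    rw [show (fun parts header =>
        let text := PySem.Str.strip (D.getD header "")
        if text = "" then parts
        else if pvSkip.any (fun skip => PySem.Str.isIn skip (PySem.Str.lower text)) then parts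
        else if PySem.Str.isIn "activity today" (PySem.Str.lower header) then
          let brief := (PySem.Str.splitlines text).filter
            (fun l => pvBrief.any (fun kw => PySem.Str.isIn kw (PySem.Str.lower l)))
          if brief ≠ [] then parts ++ [header ++ "\n" ++ PySem.Str.join "\n" brief] else parts
        else parts ++ [header ++ "\n" ++ text]) =
      (fun parts header => parts ++ (pvFmt header (D.getD header "")).toList)
      from funext fun parts => funext fun header => pvStepA_out parts header D]
    rw [pvFoldl_toList]
    exact List.nil_append _
  have hLmap : ((PySem.List.enumerate pvPriority 0).filterMap
        (fun p => (pvFmt p.2 (D.getD p.2 "")).map (fun b => (p.1, b)))).map (fun t => t.2) =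
      pvPriority.filterMap (fun h => pvFmt h (D.getD h "")) := by
    rw [List.map_filterMap]
    have he : (fun (p : Int × String) =>
        ((pvFmt p.2 (D.getD p.2 "")).map (fun b => (p.1, b))).map (fun t => t.2)) =
        (fun (p : Int × String) => pvFmt p.2 (D.getD p.2 "")) := by
      funext p; cases hf : pvFmt p.2 (D.getD p.2 "") <;> simp [hf]
    rw [he]
    calc List.filterMap (fun (p : Int × String) => pvFmt p.2 (D.getD p.2 ""))
          (PySem.List.enumerate pvPriority 0)
        = List.filterMap ((fun h => pvFmt h (D.getD h "")) ∘ (fun (x : Int × String) => x.2))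
            (PySem.List.enumerate pvPriority 0) := rfl
      _ = List.filterMap (fun h => pvFmt h (D.getD h ""))
            ((PySem.List.enumerate pvPriority 0).map (fun x => x.2)) := List.filterMap_map.symm
      _ = List.filterMap (fun h => pvFmt h (D.getD h "")) pvPriority := by
            rw [PySem.List.map_snd_enumerate]
  have hLpair : ((PySem.List.enumerate pvPriority 0).filterMap
        (fun p => (pvFmt p.2 (D.getD p.2 "")).map (fun b => (p.1, b)))).Pairwise
      (fun a b => a.1 < b.1) := by
    refine List.pairwise_filterMap.mpr ?_
    refine (PySem.List.pairwise_lt_enumerate pvPriority 0).imp ?_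
    intro a b hab
    intro q hq q' hq'
    cases hfa : pvFmt a.2 (D.getD a.2 "") with
    | none => rw [hfa] at hq; exact absurd hq (by simp)
    | some x =>
      cases hfb : pvFmt b.2 (D.getD b.2 "") with
      | none => rw [hfb] at hq'; exact absurd hq' (by simp)
      | some y =>
        rw [hfa] at hq
        rw [hfb] at hq'
        have hq1 : q.1 = a.1 := by
          have := hq.symm
          simp only [Option.map_some, Option.some.injEq] at this
          rw [this]
        have hq2 : q'.1 = b.1 := by
          have := hq'.symm
          simp only [Option.map_some, Option.some.injEq] at this
          rw [this]
        rw [hq1, hq2]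
        exact hab
  have hLnodup : ((PySem.List.enumerate pvPriority 0).filterMap
        (fun p => (pvFmt p.2 (D.getD p.2 "")).map (fun b => (p.1, b)))).Nodup :=
    hLpair.imp (by intro a b h he; rw [he] at h; exact lt_irrefl _ h)
  have hRpair : (D.items.filterMap (fun p =>
        (pvRank.get? p.1).bind (fun r => (pvFmt p.1 p.2).map (fun b => (r, b))))).Pairwise
      (fun a b => a.1 ≠ b.1) := by
    refine List.pairwise_filterMap.mpr ?_
    refine hpair_items.imp ?_
    intro p p' hne
    intro q hq q' hq'
    obtain ⟨h1, -⟩ := (hGsome p q.1 q.2).mp hq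
    obtain ⟨h1', -⟩ := (hGsome p' q'.1 q'.2).mp hq'
    intro he
    obtain ⟨k, hk, hkey, hr⟩ := (pvRank_some_iff _ _).mp h1
    obtain ⟨k', hk', hkey', hr'⟩ := (pvRank_some_iff _ _).mp h1'
    have hkk : k = k' := by
      have : (k : Int) = (k' : Int) := by rw [← hr, ← hr', he]
      exact_mod_cast this
    apply hne
    rw [← hkey, ← hkey']
    subst hkk
    rfl
  have hRnodup : (D.items.filterMap (fun p =>
        (pvRank.get? p.1).bind (fun r => (pvFmt p.1 p.2).map (fun b => (r, b))))).Nodup :=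
    hRpair.imp (by intro a b h he; exact h (congrArg Prod.fst he))
  have hmem : ∀ q : Int × String,
      q ∈ (PySem.List.enumerate pvPriority 0).filterMap
        (fun p => (pvFmt p.2 (D.getD p.2 "")).map (fun b => (p.1, b))) ↔
      q ∈ D.items.filterMap (fun p =>
        (pvRank.get? p.1).bind (fun r => (pvFmt p.1 p.2).map (fun b => (r, b)))) := by
    intro q
    constructor
    · intro hqL
      obtain ⟨p, hp, hpq⟩ := List.mem_filterMap.mp hqL
      obtain ⟨k, hk, rfl⟩ := (PySem.List.mem_enumerate_iff _ _ _).mp hp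
      simp only at hpq
      cases hg : D.get? (pvPriority[k]) with
      | none =>
        rw [PySem.Dict.getD_eq_get?_getD, hg] at hpq
        rw [show (Option.getD (α := String) none "") = "" from rfl, pvFmt_empty] at hpq
        exact absurd hpq (by simp)
      | some raw =>
        rw [PySem.Dict.getD_eq_get?_getD, hg] at hpq
        simp only [Option.getD_some] at hpq
        cases hf : pvFmt (pvPriority[k]) raw with
        | none => rw [hf] at hpq; exact absurd hpq (by simp)
        | some b =>
          rw [hf] at hpq
          have hqe : q = ((0 + (k : Int)), b) := by
            have := hpq.symm
            simp only [Option.map_some, Option.some.injEq] at this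
            rw [this]
          refine List.mem_filterMap.mpr ⟨(pvPriority[k], raw),
            PySem.Dict.mem_items_of_get?_eq_some D hg, ?_⟩
          rw [hqe]
          refine (hGsome _ _ _).mpr ⟨?_, hf⟩
          exact (pvRank_some_iff _ _).mpr ⟨k, hk, rfl, by simp⟩
    · intro hqR
      obtain ⟨p, hp, hpq⟩ := List.mem_filterMap.mp hqR
      obtain ⟨h1, h2⟩ := (hGsome p q.1 q.2).mp hpq
      obtain ⟨k, hk, hkey, hr⟩ := (pvRank_some_iff _ _).mp h1
      have hg : D.get? p.1 = some p.2 := PySem.Dict.get?_of_mem_items D hp hnd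
      refine List.mem_filterMap.mpr ⟨((0 + (k : Int)), pvPriority[k]),
        (PySem.List.mem_enumerate_iff _ _ _).mpr ⟨k, hk, rfl⟩, ?_⟩
      simp only
      rw [hkey, PySem.Dict.getD_eq_get?_getD, hg, Option.getD_some, h2]
      have hqe : q = ((0 + (k : Int)), q.2) := by
        rw [← Prod.mk.eta (p := q)]
        simp [hr]
      simp only [Option.map_some]
      rw [← hqe]
  have hperm : ((PySem.List.enumerate pvPriority 0).filterMap
        (fun p => (pvFmt p.2 (D.getD p.2 "")).map (fun b => (p.1, b)))).Perm
      (D.items.filterMap (fun p =>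
        (pvRank.get? p.1).bind (fun r => (pvFmt p.1 p.2).map (fun b => (r, b))))) :=
    (List.perm_ext_iff_of_nodup hLnodup hRnodup).mpr hmem
  rw [hB, PySem.List.sorted_eq_of_perm_of_pairwise_lt _ _ _ hperm hLpair, hLmap, hA]

-- ===== VERDICT (by name: the statement is the Claim_ definition above) =====
theorem extract_interesting_sections_py_spec : Claim_equal_extract_interesting_sections_py := by
  intro content _
  unfold Spec_extract_interesting_sections_py
  unfold extract_interesting_sections_py extract_interesting_sections_py_alt
  by_cases hs : PySem.Str.strip content = ""
  · simp [hs]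
  · simp only [hs, if_false]
    have hdict : (let st := (PySem.Str.splitlines content).foldl pvStepA (PySem.Dict.empty, "", [])
        if st.2.1 ≠ "" then st.1.insert st.2.1 (PySem.Str.join "\n" st.2.2) else st.1) =
        pvSecGo (PySem.Str.splitlines content) (PySem.Str.splitlines content).length
          PySem.Dict.empty 0 := by
      rw [pvSecGo_eq_secL _ _ 0 (Nat.zero_le _), List.drop_zero]
      exact pvFoldA_empty (PySem.Str.splitlines content) PySem.Dict.empty []
    have hnd : (pvSecGo (PySem.Str.splitlines content) (PySem.Str.splitlines content).length
        PySem.Dict.empty 0).keys.Nodup := by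
      rw [pvSecGo_eq_secL _ _ 0 (Nat.zero_le _), List.drop_zero]
      exact pvSecL_nodup _ _ PySem.Dict.nodup_keys_empty
    rw [← hdict] at hnd
    show PySem.Str.join "\n\n" _ = PySem.Str.join "\n\n" _
    rw [← hdict]
    exact (congrArg (PySem.Str.join "\n\n") (pvOut_eq _ hnd)).symm
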